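-- pv_equiv track=rewrite | github.com/ML4SCI/QMLHEP | Quantum_GAN_for_HEP_Chi_Lung_Cheng/quple/components/interaction_graphs.py | alternate_linear
-- ===== SOURCE A (Python) =====
-- from typing import List, Tuple
--
-- def alternate_linear(n:int, m:int=2) -> List[Tuple[int]]:
--     """The alternate linear interaction
--
--     In the alternate, all neiboring qubits are connected but in an alternating manner
--
--     Examples:
--     # Alternate linear graph for 5 qubit system with 2 qubit interaction
--     >> alternate_linear(n=5, m=2)
--     [(0, 1), (2, 3), (1, 2), (3, 4)]
--     # Building a circuit of 5 qubits with a layer of CNOT gates using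
--     # the alternate linear interaction graph
--     >> cq = ParameterisedCircuit(n_qubit=4)
--     >> cq.add_entanglement_layer(['CNOT'], entangle_strategy='alternate_linear')
--     >> cq
--     (0, 0): ───@───────
--                │
--     (0, 1): ───X───@───
--                    │
--     (0, 2): ───@───X───
--                │
--     (0, 3): ───X───@───
--                    │
--     (0, 4): ───────X───
--
--     Args:
--         n: int
--         Number of qubits in the system
--         m: int
--         Number of qubits involved in the multi-qubit interaction
--
--     Returns:
--         A list of tuples of qubit indices. Each tuple specifies the indices of the
--         qubits that are involved in the multi-qubit interaction.
--     """
--     if m > 2: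
--         raise ValueError('The "alternate linear" connectivity graphs requires <= 2 '
--                          'qubits in the interaction unit'
--                         ' but {} is given'.format(m))
--     if n < 2:
--         raise ValueError('The "alternate linear" connectivity graphs requires at least '
--                          '2 qubits in the circuit')
--     if m == 2:
--         return [(i, i+1) for i in range(0, n - 1, m)] + [(i+1, i+2) for i in range(0, n - 2, m)]
--     else:
--         return [(i,) for i in range(n)]
-- ===== SOURCE B (Python) =====
-- from typing import List, Tuple
--
-- def alternate_linear(n: int, m: int = 2) -> List[Tuple[int]]:
--     if m > 2:
--         raise ValueError('The "alternate linear" connectivity graphs requires <= 2 '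
--                          'qubits in the interaction unit'
--                          ' but {} is given'.format(m))
--     if n < 2:
--         raise ValueError('The "alternate linear" connectivity graphs requires at least '
--                          '2 qubits in the circuit')
--     if m != 2:
--         return [(i,) for i in range(n)]
--     # single pass over all consecutive pairs, partitioned by parity of the start index
--     evens, odds = [], []
--     for i in range(n - 1):
--         (evens if i % 2 == 0 else odds).append((i, i + 1))
--     return evens + odds
-- ===== Notes on version B (the rewrite author's own statement) =====
-- stated objective: alternative
-- what changed: For m==2 the two strided comprehensions over range(0,n-1,2) and range(0,n-2,2) are replaced by a single pass over range(n-1) that partitions consecutive pairs (i,i+1) by the parity of i into two accumulators and concatenates them.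
import Mathlib
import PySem

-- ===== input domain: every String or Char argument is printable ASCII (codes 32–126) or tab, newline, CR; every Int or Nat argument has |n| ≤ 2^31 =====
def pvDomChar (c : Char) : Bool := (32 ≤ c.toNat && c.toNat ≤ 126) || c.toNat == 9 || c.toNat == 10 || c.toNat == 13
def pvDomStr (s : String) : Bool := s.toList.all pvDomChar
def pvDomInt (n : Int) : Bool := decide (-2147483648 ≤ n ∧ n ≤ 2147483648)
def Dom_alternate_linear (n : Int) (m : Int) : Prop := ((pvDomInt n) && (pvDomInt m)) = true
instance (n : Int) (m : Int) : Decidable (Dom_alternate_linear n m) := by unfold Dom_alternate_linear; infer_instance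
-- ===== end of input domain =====

-- B replaces A's two strided comprehensions by one pass over range(n-1) that partitions pairs by parity (objective: alternative, same cost).
-- ===== PORT A =====
def alternate_linear (n : Int) (m : Int) : List (List Int) :=
  if 2 < m then []  -- Python raises ValueError here; excluded by Pre_
  else if n < 2 then []  -- Python raises ValueError here; excluded by Pre_
  else if m == 2 then
    ((PySem.List.pyRange 0 (n - 1) 2).map (fun i => [i, i + 1])) ++
      ((PySem.List.pyRange 0 (n - 2) 2).map (fun i => [i + 1, i + 2]))
  else
    (PySem.List.pyRange 0 n 1).map (fun i => [i])

-- ===== PORT B =====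
def alternate_linear_alt (n : Int) (m : Int) : List (List Int) :=
  if 2 < m then []  -- Python raises ValueError here; excluded by Pre_
  else if n < 2 then []  -- Python raises ValueError here; excluded by Pre_
  else if m ≠ 2 then
    (PySem.List.pyRange 0 n 1).map (fun i => [i])
  else
    let p := (PySem.List.pyRange 0 (n - 1) 1).foldl
      (fun (p : List (List Int) × List (List Int)) i =>
        if PySem.Int.mod i 2 == 0 then (p.1 ++ [[i, i + 1]], p.2) else (p.1, p.2 ++ [[i, i + 1]]))
      ([], [])
    p.1 ++ p.2

-- ===== PRECONDITION & SPEC =====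
-- Pre_ excludes exactly the inputs on which A raises ValueError (m > 2 or n < 2).
def Pre_alternate_linear (n : Int) (m : Int) : Prop := m ≤ 2 ∧ 2 ≤ n
instance (n : Int) (m : Int) : Decidable (Pre_alternate_linear n m) := by unfold Pre_alternate_linear; infer_instance
def pvWitness_alternate_linear : Int × Int := (5, 2)
def Spec_alternate_linear (n : Int) (m : Int) (out : List (List Int)) : Prop := out = alternate_linear_alt n m
instance (n : Int) (m : Int) (out : List (List Int)) : Decidable (Spec_alternate_linear n m out) := by unfold Spec_alternate_linear; infer_instance

-- ===== CLAIM (what is proved, stated in full; the proofs are below) =====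
def Claim_equal_alternate_linear : Prop := ∀ (n : Int) (m : Int), Dom_alternate_linear n m → Pre_alternate_linear n m → Spec_alternate_linear n m (alternate_linear n m)

-- ===== LEMMAS AND PROOFS =====

-- B's partitioning fold, characterised: it is the even-filter and the odd-filter of the traversed list.
theorem foldl_partition (c : Int → Bool) (f : Int → List Int) :
    ∀ (l : List Int) (e o : List (List Int)),
      l.foldl (fun (p : List (List Int) × List (List Int)) i =>
          if c i then (p.1 ++ [f i], p.2) else (p.1, p.2 ++ [f i])) (e, o)
        = (e ++ (l.filter c).map f, o ++ (l.filter (fun i => !c i)).map f) := by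
  intro l
  induction l with
  | nil => intro e o; simp
  | cons x xs ih =>
    intro e o
    by_cases h : c x <;> simp [h, ih, List.append_assoc]

theorem mod_two_cast (j : Nat) : (PySem.Int.mod (j : Int) 2 == 0) = decide (j % 2 = 0) := by
  have h : PySem.Int.mod (j : Int) 2 = ((j % 2 : Nat) : Int) := by
    exact_mod_cast PySem.Int.mod_natCast j 2
  rw [h]
  rcases Nat.mod_two_eq_zero_or_one j with h2 | h2 <;> simp [h2]

theorem filter_even_range (k : Nat) :
    ((List.range k).map (fun (j : Nat) => (j : Int))).filter (fun i => PySem.Int.mod i 2 == 0)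
      = (List.range ((k + 1) / 2)).map (fun (j : Nat) => 2 * (j : Int)) := by
  induction k with
  | zero => rfl
  | succ k ih =>
    rw [List.range_succ, List.map_append, List.filter_append, ih]
    by_cases h : k % 2 = 0
    · have hk : (k + 1 + 1) / 2 = (k + 1) / 2 + 1 := by omega
      rw [hk, List.range_succ, List.map_append]
      congr 1
      simp only [List.map_cons, List.map_nil, List.filter_cons, List.filter_nil, mod_two_cast, h]
      norm_num
      omega
    · have hk : (k + 1 + 1) / 2 = (k + 1) / 2 := by omega
      rw [hk]
      simp only [List.map_cons, List.map_nil, List.filter_cons, List.filter_nil, mod_two_cast, h]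
      simp

theorem filter_odd_range (k : Nat) :
    ((List.range k).map (fun (j : Nat) => (j : Int))).filter (fun i => !(PySem.Int.mod i 2 == 0))
      = (List.range (k / 2)).map (fun (j : Nat) => 2 * (j : Int) + 1) := by
  induction k with
  | zero => rfl
  | succ k ih =>
    rw [List.range_succ, List.map_append, List.filter_append, ih]
    by_cases h : k % 2 = 0
    · have hk : (k + 1) / 2 = k / 2 := by omega
      rw [hk]
      simp only [List.map_cons, List.map_nil, List.filter_cons, List.filter_nil, mod_two_cast, h]
      simp
    · have hk : (k + 1) / 2 = k / 2 + 1 := by omega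
      rw [hk, List.range_succ, List.map_append]
      congr 1
      simp only [List.map_cons, List.map_nil, List.filter_cons, List.filter_nil, mod_two_cast, h]
      norm_num
      omega

-- step-2 range starting at 0, as a map of List.range (uniform in the bound)
theorem pyRange_two (t : Int) :
    PySem.List.pyRange 0 t 2 = (List.range ((t + 1) / 2).toNat).map (fun (j : Nat) => 2 * (j : Int)) := by
  rw [PySem.List.pyRange_of_pos 0 t (by norm_num)]
  by_cases h : (0 : Int) < t
  · have heq : (t - 0 + 2 - 1) / 2 = (t + 1) / 2 := by omega
    rw [if_pos h, heq]
    apply List.map_congr_left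
    intro j _
    ring
  · have heq : ((t + 1) / 2).toNat = 0 := by omega
    rw [if_neg h, heq]
    rfl

-- ===== VERDICT (by name: the statement is the Claim_ definition above) =====
theorem alternate_linear_spec : Claim_equal_alternate_linear := by
  intro n m _ hpre
  unfold Pre_alternate_linear at hpre
  have hm : ¬ (2 < m) := by omega
  have hn : ¬ (n < 2) := by omega
  unfold Spec_alternate_linear alternate_linear alternate_linear_alt
  rw [if_neg hm, if_neg hn, if_neg hm, if_neg hn]
  by_cases hm2 : m = 2
  · subst hm2
    rw [if_pos (by simp), if_neg (by simp)]
    rw [PySem.List.pyRange_one 0 (n - 1)]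
    simp only [zero_add]
    rw [foldl_partition (fun i => PySem.Int.mod i 2 == 0) (fun i => [i, i + 1]),
        filter_even_range, filter_odd_range]
    simp only [List.nil_append]
    rw [pyRange_two (n - 1), pyRange_two (n - 2)]
    have e1 : ((n - 1 + 1) / 2).toNat = ((n - 1 - 0).toNat + 1) / 2 := by omega
    have e2 : ((n - 2 + 1) / 2).toNat = (n - 1 - 0).toNat / 2 := by omega
    rw [e1, e2]
    simp only [List.map_map]
    congr 1
  · rw [if_neg (by simpa using hm2), if_pos hm2]
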